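-- pv_equiv track=rewrite | github.com/YehudaMelvin/TubesKPL2 | utils.py | is_valid_member_id
-- ===== SOURCE A (Python) =====
-- def is_valid_member_id(member_id: str) -> bool:
--     state = 0
--     for char in member_id:
--         if state == 0 and char == 'M':
--             state = 1
--         elif state == 1 and char.isdigit():
--             state = 2
--         elif state == 2 and char.isdigit():
--             continue
--         else:
--             return False
--     return state == 2
-- ===== SOURCE B (Python) =====
-- def is_valid_member_id(member_id: str) -> bool:
--     return len(member_id) >= 2 and member_id[0] == 'M' and member_id[1:].isdigit()
-- ===== Notes on version B (the rewrite author's own statement) =====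
-- stated objective: idiomatic
-- what changed: Replaced the character-by-character finite-state machine with a single closed-form boolean: length >= 2, a prefix-character comparison, and the remainder checked by the built-in str.isdigit.
import Mathlib
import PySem

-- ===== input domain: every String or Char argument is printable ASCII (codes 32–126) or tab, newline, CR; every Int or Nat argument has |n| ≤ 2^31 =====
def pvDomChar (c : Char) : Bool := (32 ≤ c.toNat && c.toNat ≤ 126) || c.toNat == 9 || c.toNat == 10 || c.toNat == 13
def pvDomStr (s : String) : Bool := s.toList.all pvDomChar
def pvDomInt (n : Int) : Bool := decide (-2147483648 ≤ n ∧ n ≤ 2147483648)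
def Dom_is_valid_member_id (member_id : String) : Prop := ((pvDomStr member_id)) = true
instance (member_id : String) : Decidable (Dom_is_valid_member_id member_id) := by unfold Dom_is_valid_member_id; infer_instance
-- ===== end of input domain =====

-- B replaces A's per-character state machine with one closed-form boolean check (idiomatic).

-- ===== PORT A =====
-- the for-loop over the characters, carrying Python's integer `state`; early `return False` = the final `false` branch
def pvALoop (state : Int) : List Char → Bool
  | [] => state == 2
  | c :: rest =>
    if state == 0 && c == 'M' then pvALoop 1 rest
    else if state == 1 && PySem.Chars.isdigit c then pvALoop 2 rest
    else if state == 2 && PySem.Chars.isdigit c then pvALoop state rest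
    else false

def is_valid_member_id (member_id : String) : Bool := pvALoop 0 member_id.toList

-- ===== PORT B =====
def is_valid_member_id_alt (member_id : String) : Bool :=
  decide ((2 : Int) ≤ PySem.Str.len member_id)
    && (PySem.Str.pyGet? member_id 0 == some 'M')
    && PySem.Str.strIsdigit (PySem.Str.slice member_id (some 1) none)

-- ===== PRECONDITION & SPEC =====
def Spec_is_valid_member_id (member_id : String) (out : Bool) : Prop := out = is_valid_member_id_alt member_id
instance (member_id : String) (out : Bool) : Decidable (Spec_is_valid_member_id member_id out) := by unfold Spec_is_valid_member_id; infer_instance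

-- ===== CLAIM (what is proved, stated in full; the proofs are below) =====
def Claim_equal_is_valid_member_id : Prop := ∀ (member_id : String), Dom_is_valid_member_id member_id → Spec_is_valid_member_id member_id (is_valid_member_id member_id)

-- ===== LEMMAS AND PROOFS =====

-- once in state 2 the loop just checks every remaining character is a digit
theorem pvALoop_two (cs : List Char) : pvALoop 2 cs = cs.all PySem.Chars.isdigit := by
  induction cs with
  | nil => rfl
  | cons c rest ih =>
    simp only [pvALoop, List.all_cons]
    by_cases h : PySem.Chars.isdigit c = true <;> simp [h, ih]

-- ===== VERDICT (by name: the statement is the Claim_ definition above) =====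
theorem pvKey (cs : List Char) :
    pvALoop 0 cs =
      (decide ((2 : Int) ≤ cs.length) && (PySem.List.pyGet? cs 0 == some 'M')
        && PySem.Chars.strIsdigit (cs.drop 1)) := by
  cases cs with
  | nil => simp [pvALoop, PySem.List.pyGet?, PySem.Chars.strIsdigit]
  | cons c rest =>
    cases rest with
    | nil =>
      simp only [pvALoop]
      by_cases hc : c = 'M' <;>
        simp [hc, PySem.List.pyGet?, PySem.List.pyIdx?, PySem.Chars.strIsdigit]
    | cons d rest' =>
      simp only [pvALoop]
      have h0 : (0 : Int) ≤ (rest'.length : Int) + 1 := by positivity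
      have h2 : (2 : Int) ≤ (rest'.length : Int) + 1 + 1 := by omega
      by_cases hc : c = 'M'
      · simp [hc, pvALoop_two, PySem.List.pyGet?, PySem.List.pyIdx?,
          PySem.Chars.strIsdigit, h0, h2]
      · simp [hc, PySem.List.pyGet?, PySem.List.pyIdx?, h0, h2]

theorem is_valid_member_id_spec : Claim_equal_is_valid_member_id := by
  intro s _
  unfold Spec_is_valid_member_id is_valid_member_id is_valid_member_id_alt
  simp only [PySem.Str.len_eq, PySem.Str.pyGet?_eq, PySem.Chars.pyGet?_eq_listPyGet?,
    PySem.Str.strIsdigit_eq, PySem.Str.toList_slice, PySem.Chars.slice_eq_listSlice]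
  rw [PySem.List.slice_from (xs := s.toList) (a := 1) (by norm_num)]
  exact pvKey s.toList
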